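-- pv_equiv track=rewrite | github.com/myeongjunkim/Algorithm | 백준/Gold IV/2661. 좋은수열/좋은수열.py | solution
-- ===== SOURCE A (Python) =====
-- def solution(N):
--
--   answer = []
--   result = []
--   def back_tracking():
--     if result:
--       return
--     if len(answer) == N:
--       result.append("".join(list(map(str, answer))))
--       return
--
--     for n in [1,2,3]:
--       answer.append(n)
--       for i in range(1, len(answer)//2+1):
--         if answer[-i-i:-i] == answer[-i:]:
--           break
--       else:
--         back_tracking()
--       answer.pop()
--
--   back_tracking()
--   return result[0]
-- ===== SOURCE B (Python) =====
-- def solution(N):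
--     # Iterative backtracking with an explicit stack: seq holds the placed digits,
--     # d is the next digit to try at the current position.
--     seq = []
--     d = 1
--     while len(seq) != N:
--         if d > 3:
--             d = seq.pop() + 1
--         elif _ok(seq + [d]):
--             seq.append(d)
--             d = 1
--         else:
--             d += 1
--     return "".join(map(str, seq))
--
--
-- def _ok(seq):
--     n = len(seq)
--     for i in range(1, n // 2 + 1):
--         if seq[n - 2 * i:n - i] == seq[n - i:]:
--             return False
--     return True
-- ===== Notes on version B (the rewrite author's own statement) =====
-- stated objective: alternative
-- what changed: A's shared-mutable-state recursion (nested back_tracking closure mutating `answer` and a `result` flag, joined at the end via result[0]) is replaced by an explicit iterative backtracking loop over a state (seq, next-digit-to-try) that pops to backtrack and returns the joined string directly; the ascending 1,2,3 try order and the all-block-sizes suffix check are preserved, so the first completed sequence is identical.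
import Mathlib
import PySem

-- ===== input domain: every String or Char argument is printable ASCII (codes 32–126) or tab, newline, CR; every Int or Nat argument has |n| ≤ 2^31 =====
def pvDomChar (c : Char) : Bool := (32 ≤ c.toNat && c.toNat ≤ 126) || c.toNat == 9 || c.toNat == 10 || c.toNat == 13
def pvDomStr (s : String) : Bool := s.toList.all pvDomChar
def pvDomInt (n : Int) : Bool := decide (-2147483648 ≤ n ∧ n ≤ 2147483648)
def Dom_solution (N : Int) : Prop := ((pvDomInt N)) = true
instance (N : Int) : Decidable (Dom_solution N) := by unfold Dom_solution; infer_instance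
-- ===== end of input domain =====

-- B replaces A's shared-state recursion (mutable `answer`/`result`) by an explicit iterative
-- backtracking loop over (sequence, next-digit-to-try); objective: alternative structure, same result.

-- ===== PORT A =====
-- "".join(list(map(str, answer)))
def pyJoin (answer : List Int) : String :=
  PySem.Str.join "" (answer.map PySem.Int.toStr)

-- A's inner `for i in range(1, len(answer)//2+1): if answer[-i-i:-i] == answer[-i:]: break`:
-- the for/break/else fires the recursion iff NO i matches, i.e. iff this `any` is false.
def hasRepA (answer : List Int) : Bool :=
  (PySem.List.pyRange 1 (PySem.Int.floordiv (answer.length : Int) 2 + 1) 1).any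
    (fun i => PySem.List.slice answer (some (-i - i)) (some (-i)) ==
              PySem.List.slice answer (some (-i)) none)

-- `back_tracking` with the mutable `answer`/`result` made explicit: the Option value is the
-- content of `result` (the `if result: return` early exit is the `match acc with | some r` arm).
-- Fuel = recursion depth; `solution` passes N.toNat + 1, enough for every call A's recursion makes.
def btA (fuel : Nat) (N : Int) (answer : List Int) : Option String :=
  match fuel with
  | 0 => none
  | fuel + 1 =>
    if (answer.length : Int) = N then some (pyJoin answer)
    else
      ([1, 2, 3] : List Int).foldl
        (fun acc x =>
          match acc with
          | some r => some r
          | none =>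
            if hasRepA (answer ++ [x]) then none
            else btA fuel N (answer ++ [x]))
        none

-- `return result[0]`: none = IndexError (A raises; outside Pre_solution)
def solution (N : Int) : String :=
  match btA (N.toNat + 1) N [] with
  | some r => r
  | none => ""

-- ===== PORT B =====
-- Source B's `_ok`
def okB (seq : List Int) : Bool :=
  (PySem.List.pyRange 1 (PySem.Int.floordiv (seq.length : Int) 2 + 1) 1).all
    (fun i => !(PySem.List.slice seq (some ((seq.length : Int) - 2 * i)) (some ((seq.length : Int) - i)) ==
                PySem.List.slice seq (some ((seq.length : Int) - i)) none))

-- Source B's while-loop: state = (seq, d).  `seq.pop()` on an empty list = IndexError = none.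
-- Fuel totality guard: 5 ^ (N.toNat + 1) bounds the number of loop iterations (proved below).
def loopB (fuel : Nat) (N : Int) (seq : List Int) (d : Int) : Option (List Int) :=
  match fuel with
  | 0 => none
  | fuel + 1 =>
    if (seq.length : Int) = N then some seq
    else if 3 < d then
      match seq.getLast? with
      | none => none
      | some y => loopB fuel N seq.dropLast (y + 1)
    else if okB (seq ++ [d]) then loopB fuel N (seq ++ [d]) 1
    else loopB fuel N seq (d + 1)

def solution_alt (N : Int) : String :=
  match loopB (5 ^ (N.toNat + 1)) N [] 1 with
  | some seq => pyJoin seq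
  | none => ""

-- ===== PRECONDITION & SPEC =====
-- Pre_ excludes exactly N < 0, where A never returns: the recursion can never reach
-- len(answer) == N, so it deepens forever and dies with RecursionError.
def Pre_solution (N : Int) : Prop := 0 ≤ N
instance (N : Int) : Decidable (Pre_solution N) := by unfold Pre_solution; infer_instance

def pvWitness_solution : Int := 7

def Spec_solution (N : Int) (out : String) : Prop := out = solution_alt N
instance (N : Int) (out : String) : Decidable (Spec_solution N out) := by unfold Spec_solution; infer_instance

-- ===== CLAIM (what is proved, stated in full; the proofs are below) =====
def Claim_equal_solution : Prop := ∀ (N : Int), Dom_solution N → Pre_solution N → Spec_solution N (solution N)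

-- ===== LEMMAS AND PROOFS =====

-- The two validity tests agree: B's positive slice bounds equal A's negative ones.
theorem okB_eq_not_hasRepA (s : List Int) : okB s = !hasRepA s := by
  unfold okB hasRepA
  rw [List.all_eq_not_any_not]
  congr 1
  apply PySem.List.any_congr_mem
  intro i hi
  rw [PySem.List.mem_pyRange_one] at hi
  obtain ⟨h1, h2⟩ := hi
  have hfd : PySem.Int.floordiv (s.length : Int) 2 = ((s.length / 2 : Nat) : Int) := by
    exact_mod_cast PySem.Int.floordiv_natCast s.length 2
  rw [hfd] at h2
  obtain ⟨j, rfl⟩ : ∃ j : Nat, i = (j : Int) := ⟨i.toNat, (Int.toNat_of_nonneg (by omega)).symm⟩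
  have hj1 : 1 ≤ j := by exact_mod_cast h1
  have hj2 : 2 * j ≤ s.length := by
    have : (j : Int) ≤ ((s.length / 2 : Nat) : Int) := by omega
    have : j ≤ s.length / 2 := by exact_mod_cast this
    omega
  have e2 : PySem.List.slice s (some ((s.length : Int) - j)) none =
      PySem.List.slice s (some (-(j : Int))) none := by
    rw [show ((s.length : Int) - j) = ((s.length - j : Nat) : Int) by omega,
      PySem.List.slice_from_natCast, PySem.List.slice_from_neg_natCast s j (by omega)]
  have e1 : PySem.List.slice s (some ((s.length : Int) - 2 * j)) (some ((s.length : Int) - j)) =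
      PySem.List.slice s (some (-(j : Int) - j)) (some (-(j : Int))) := by
    rw [show ((s.length : Int) - 2 * j) = ((s.length - 2 * j : Nat) : Int) by omega,
      show ((s.length : Int) - j) = ((s.length - j : Nat) : Int) by omega,
      PySem.List.slice_natCast,
      show (-(j : Int) - j) = -((2 * j : Nat) : Int) by push_cast; ring]
    simp only [PySem.List.slice, PySem.List.clampIdx_neg_natCast s.length (2 * j) (by omega),
      PySem.List.clampIdx_neg_natCast s.length j (by omega)]
  simp only [Bool.not_not, e1, e2]

-- Spec-level search (pure, fuel-free), used only by the proofs.
-- `rest n ans d` = try digits d,d+1,…,3 at position ans.length, full depth-first below.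
def rest (n : Nat) (ans : List Int) (d : Int) : Option (List Int) :=
  if 3 < d then none
  else
    (if okB (ans ++ [d]) then
       (if ans.length + 1 = n then some (ans ++ [d])
        else if _hl : n < ans.length + 1 then none
        else rest n (ans ++ [d]) 1)
     else none).or (rest n ans (d + 1))
termination_by (n + 1 - ans.length, (4 - d).toNat)
decreasing_by
  · apply Prod.Lex.left; simp; omega
  · apply Prod.Lex.right' <;> omega

def bt (n : Nat) (ans : List Int) : Option (List Int) :=
  if ans.length = n then some ans
  else if n < ans.length then none
  else rest n ans 1

-- The machine's denotation: pending work of state (seq, d) as a chain of `rest`s down the stack.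
def Den (n : Nat) (seq : List Int) (d : Int) : Option (List Int) :=
  if seq.length = n then some seq
  else
    (rest n seq d).or
      (if h : seq = [] then none else Den n seq.dropLast (seq.getLast h + 1))
termination_by seq.length
decreasing_by
  have := List.length_pos_iff.mpr h
  simp only [List.length_dropLast]
  omega

theorem rest_eq (n : Nat) (ans : List Int) (d : Int) :
    rest n ans d = if 3 < d then none
      else (if okB (ans ++ [d]) then bt n (ans ++ [d]) else none).or (rest n ans (d + 1)) := by
  rw [rest]
  simp only [bt, List.length_append, List.length_cons, List.length_nil, Nat.zero_add, dite_eq_ite]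

-- A's fueled recursion computes `bt` (joined) whenever the fuel covers the remaining depth.
-- Shape of A's `for n in [1,2,3]` loop with the `if result: return` early exit.
theorem foldl_match_or {α : Type} (f : Int → Option α) : ∀ (l : List Int) (acc : Option α),
    l.foldl (fun a x => a.or (f x)) acc = acc.or (l.foldr (fun x r => (f x).or r) none) := by
  intro l
  induction l with
  | nil => intro acc; simp
  | cons x l ihl => intro acc; simp only [List.foldl, List.foldr, ihl, Option.or_assoc]

theorem btA_eq_bt (n : Nat) : ∀ (fuel : Nat) (ans : List Int), n < fuel + ans.length →
    btA fuel (n : Int) ans = (bt n ans).map pyJoin := by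
  intro fuel
  induction fuel with
  | zero =>
    intro ans h
    rw [btA, bt, if_neg (by omega), if_pos (by omega)]
    rfl
  | succ fuel ih =>
    intro ans h
    have ht : ∀ x : Int, (if hasRepA (ans ++ [x]) then none else btA fuel (n : Int) (ans ++ [x]))
        = (if okB (ans ++ [x]) then bt n (ans ++ [x]) else none).map pyJoin := by
      intro x
      cases hok : okB (ans ++ [x]) <;>
        rw [okB_eq_not_hasRepA] at hok <;> simp at hok <;>
        simp [hok, ih (ans ++ [x]) (by simp; omega)]
    rw [btA]
    have hfun : (fun (acc : Option String) (x : Int) =>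
        match acc with
        | some r => some r
        | none => if hasRepA (ans ++ [x]) then none else btA fuel (n : Int) (ans ++ [x]))
        = (fun acc x => acc.or (if hasRepA (ans ++ [x]) then none else btA fuel (n : Int) (ans ++ [x]))) := by
      funext acc x; cases acc <;> rfl
    by_cases hlen : ans.length = n
    · rw [if_pos (by exact_mod_cast hlen), bt, if_pos hlen]; rfl
    · rw [if_neg (by exact_mod_cast hlen)]
      rw [hfun, foldl_match_or (fun x => if hasRepA (ans ++ [x]) then none else btA fuel (n : Int) (ans ++ [x])) [1, 2, 3] none]
      simp only [List.foldr, ht, Option.none_or]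
      by_cases hgt : n < ans.length
      · have hnone : ∀ x : Int, bt n (ans ++ [x]) = none := by
          intro x; rw [bt, if_neg (by simp; omega), if_pos (by simp; omega)]
        conv_rhs => rw [bt, if_neg hlen, if_pos hgt]
        simp [hnone]
      · have hbt : bt n ans = rest n ans 1 := by rw [bt, if_neg hlen, if_neg hgt]
        rw [hbt, rest_eq n ans 1, rest_eq n ans (1 + 1), rest_eq n ans (1 + 1 + 1),
          rest_eq n ans (1 + 1 + 1 + 1)]
        rw [if_neg (by norm_num : ¬(3 : Int) < 1), if_neg (by norm_num : ¬(3 : Int) < 1 + 1),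
          if_neg (by norm_num : ¬(3 : Int) < 1 + 1 + 1), if_pos (by norm_num : (3 : Int) < 1 + 1 + 1 + 1)]
        norm_num [Option.map_or, Option.map_none, Option.or_none]

-- DFS-progress measure: strictly increases at every machine step, bounded by 5^(n+1).
def Wf (n : Nat) : Nat → List Int → Nat
  | _, [] => 0
  | i, x :: xs => x.toNat * 5 ^ (n - i) + Wf n (i + 1) xs

def Vm (n : Nat) (seq : List Int) (d : Int) : Nat :=
  Wf n 0 seq + d.toNat * 5 ^ (n - seq.length)

theorem Wf_append (n : Nat) (x : Int) : ∀ (ys : List Int) (i : Nat),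
    Wf n i (ys ++ [x]) = Wf n i ys + x.toNat * 5 ^ (n - (i + ys.length)) := by
  intro ys
  induction ys with
  | nil => intro i; simp [Wf]
  | cons y ys ihy =>
    intro i
    simp only [List.cons_append, Wf, ihy (i + 1), List.length_cons,
      show i + 1 + ys.length = i + (ys.length + 1) from by omega]
    ring

theorem Vm_extend (n : Nat) (seq : List Int) (d : Int) :
    Vm n (seq ++ [d]) 1 = Vm n seq d + 5 ^ (n - (seq.length + 1)) := by
  have hlen : (seq ++ [d]).length = seq.length + 1 := by simp
  simp only [Vm, Wf_append n d seq 0, Nat.zero_add, hlen, Int.toNat_one, one_mul]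

theorem Vm_incr (n : Nat) (seq : List Int) (d : Int) (hd : 0 ≤ d) :
    Vm n seq (d + 1) = Vm n seq d + 5 ^ (n - seq.length) := by
  simp only [Vm, Int.toNat_add hd (by norm_num : (0:Int) ≤ 1), Int.toNat_one]
  ring

theorem Vm_pop (n : Nat) (ys : List Int) (y : Int) (h : ys.length + 1 ≤ n) (hy : 0 ≤ y) :
    Vm n ys (y + 1) = Vm n (ys ++ [y]) 4 + 5 ^ (n - (ys.length + 1)) := by
  simp only [Vm, Wf_append n y ys 0, List.length_append, List.length_cons, List.length_nil,
    Nat.zero_add, Int.toNat_add hy (by norm_num : (0:Int) ≤ 1)]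
  have h5 : (5:Nat) ^ (n - ys.length) = 5 ^ (n - (ys.length + 1)) * 5 := by
    rw [← pow_succ]
    congr 1
    omega
  rw [h5]
  simp only [Int.toNat_one, show (4 : Int).toNat = 4 from rfl]
  ring

theorem Vm_bound (n : Nat) : ∀ (seq : List Int) (d : Int), (∀ x ∈ seq, 0 ≤ x ∧ x ≤ 3) →
    d.toNat ≤ 4 → seq.length ≤ n → Vm n seq d + 5 ^ (n - seq.length) ≤ 5 ^ (n + 1) := by
  intro seq
  induction seq using List.reverseRecOn with
  | nil =>
    intro d _ hd _
    simp only [Vm, Wf, List.length_nil, Nat.sub_zero, Nat.zero_add]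
    have : d.toNat * 5 ^ n + 5 ^ n ≤ 5 * 5 ^ n := by nlinarith [Nat.pow_pos (show 0 < 5 by norm_num) (n := n)]
    calc d.toNat * 5 ^ n + 5 ^ n ≤ 5 * 5 ^ n := this
      _ = 5 ^ (n + 1) := by rw [pow_succ]; ring
  | append_singleton ys x ihy =>
    intro d hmem hd hlen
    simp only [List.length_append, List.length_cons, List.length_nil, Nat.zero_add] at hlen ⊢
    have hx := hmem x (by simp)
    have hys : ∀ z ∈ ys, 0 ≤ z ∧ z ≤ 3 := fun z hz => hmem z (by simp [hz])
    have hVm : Vm n (ys ++ [x]) d = Vm n ys x + d.toNat * 5 ^ (n - (ys.length + 1)) := by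
      simp only [Vm, Wf_append n x ys 0, List.length_append, List.length_cons, List.length_nil,
        Nat.zero_add]
    have hxt : x.toNat ≤ 4 := by omega
    have ih := ihy x hys hxt (by omega)
    have h5 : (5:Nat) ^ (n - ys.length) = 5 ^ (n - (ys.length + 1)) * 5 := by
      rw [← pow_succ]; congr 1; omega
    rw [hVm]
    have : d.toNat * 5 ^ (n - (ys.length + 1)) + 5 ^ (n - (ys.length + 1)) ≤ 5 ^ (n - ys.length) := by
      rw [h5]; nlinarith [Nat.pow_pos (show 0 < 5 by norm_num) (n := n - (ys.length + 1))]
    omega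

-- KEY: with fuel past the measure gap, the machine computes the denotation.
theorem loopB_eq_Den (n : Nat) : ∀ (fuel : Nat) (seq : List Int) (d : Int),
    (∀ x ∈ seq, 1 ≤ x ∧ x ≤ 3) → seq.length ≤ n → 1 ≤ d → d ≤ 4 →
    5 ^ (n + 1) - Vm n seq d < fuel →
    loopB fuel (n : Int) seq d = Den n seq d := by
  intro fuel
  induction fuel with
  | zero => intro seq d _ _ _ _ hf; omega
  | succ fuel ih =>
    intro seq d hmem hlen hd1 hd4 hf
    have hmem03 : ∀ x ∈ seq, 0 ≤ x ∧ x ≤ 3 :=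
      fun x hx => ⟨by have := (hmem x hx).1; omega, (hmem x hx).2⟩
    rw [loopB]
    by_cases he : seq.length = n
    · rw [if_pos (by exact_mod_cast he), Den, if_pos he]
    · rw [if_neg (by exact_mod_cast he)]
      by_cases h3 : 3 < d
      · have hd : d = 4 := by omega
        subst hd
        rcases List.eq_nil_or_concat seq with hnil | ⟨ys, y, hys⟩
        · subst hnil
          rw [if_pos (by norm_num : (3 : Int) < 4), Den, if_neg he,
            rest_eq n [] 4, if_pos (by norm_num : (3 : Int) < 4)]
          simp
        · rw [List.concat_eq_append] at hys
          subst hys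
          have hy := hmem y (by simp)
          have hysmem : ∀ x ∈ ys, 1 ≤ x ∧ x ≤ 3 := fun x hx => hmem x (by simp [hx])
          have hlen' : ys.length + 1 ≤ n := by simpa using hlen
          have hpop := Vm_pop n ys y hlen' (by omega)
          have hbnd := Vm_bound n ys (y + 1)
            (fun x hx => (by have := hysmem x hx; omega : 0 ≤ x ∧ x ≤ 3))
            (by omega) (by omega)
          have hpow1 := Nat.pow_pos (show 0 < 5 by norm_num) (n := n - (ys.length + 1))
          have hpow2 := Nat.pow_pos (show 0 < 5 by norm_num) (n := n - ys.length)
          rw [if_pos (by norm_num : (3 : Int) < 4)]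
          simp only [List.getLast?_concat, List.dropLast_concat]
          conv_rhs => rw [Den]
          rw [if_neg he, rest_eq n (ys ++ [y]) 4, if_pos (by norm_num : (3 : Int) < 4),
            Option.none_or, dif_neg (by simp : ¬(ys ++ [y]) = [])]
          simp only [List.getLast_concat, List.dropLast_concat]
          exact ih ys (y + 1) hysmem (by omega) (by omega) (by omega) (by omega)
      · have hlt : seq.length < n := by omega
        rw [if_neg h3]
        by_cases hok : okB (seq ++ [d])
        · rw [if_pos hok]
          have hmem' : ∀ x ∈ seq ++ [d], 1 ≤ x ∧ x ≤ 3 := by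
            intro x hx
            rcases List.mem_append.mp hx with h | h
            · exact hmem x h
            · simp at h; subst h; exact ⟨hd1, by omega⟩
          have hext := Vm_extend n seq d
          have hbnd := Vm_bound n (seq ++ [d]) 1
            (fun x hx => (by have := hmem' x hx; omega : 0 ≤ x ∧ x ≤ 3))
            (by norm_num) (by simp; omega)
          have hpow1 := Nat.pow_pos (show 0 < 5 by norm_num) (n := n - (seq.length + 1))
          have hpow2 := Nat.pow_pos (show 0 < 5 by norm_num) (n := n - (seq ++ [d]).length)
          rw [ih (seq ++ [d]) 1 hmem' (by simp; omega) (by norm_num) (by norm_num) (by omega)]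
          conv_lhs => rw [Den]
          rw [dif_neg (by simp : ¬(seq ++ [d]) = [])]
          simp only [List.getLast_concat, List.dropLast_concat]
          conv_lhs => rw [Den, if_neg he]
          conv_rhs => rw [Den, if_neg he, rest_eq n seq d, if_neg h3, if_pos hok, bt]
          rw [if_neg (by simp; omega : ¬n < (seq ++ [d]).length)]
          by_cases hc : (seq ++ [d]).length = n
          · simp [hc]
          · have hc' : ¬seq.length + 1 = n := by simpa using hc
            simp [hc', Option.or_assoc]
        · rw [if_neg hok]
          have hincr := Vm_incr n seq d (by omega)
          have hbnd := Vm_bound n seq (d + 1) hmem03 (by omega) hlen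
          have hpow1 := Nat.pow_pos (show 0 < 5 by norm_num) (n := n - seq.length)
          rw [ih seq (d + 1) hmem hlen (by omega) (by omega) (by omega)]
          conv_lhs => rw [Den, if_neg he]
          conv_rhs => rw [Den, if_neg he, rest_eq n seq d, if_neg h3]
          rw [if_neg (by simp [hok]), Option.none_or]

theorem Den_nil (n : Nat) : Den n [] 1 = bt n [] := by
  rw [Den, bt]
  by_cases hn : ([] : List Int).length = n
  · rw [if_pos hn, if_pos hn]
  · rw [if_neg hn, if_neg hn, dif_pos rfl, Option.or_none,
      if_neg (by simp : ¬n < ([] : List Int).length)]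

-- ===== VERDICT (by name: the statement is the Claim_ definition above) =====
theorem solution_spec : Claim_equal_solution := by
  intro N _ h0
  obtain ⟨n, rfl⟩ : ∃ n : Nat, N = (n : Int) := ⟨N.toNat, (Int.toNat_of_nonneg h0).symm⟩
  show solution (n : Int) = solution_alt (n : Int)
  unfold solution solution_alt
  have hA : btA ((n : Int).toNat + 1) (n : Int) [] = (bt n []).map pyJoin := by
    rw [Int.toNat_natCast]
    exact btA_eq_bt n (n + 1) [] (by simp)
  have hB : loopB (5 ^ ((n : Int).toNat + 1)) (n : Int) [] 1 = Den n [] 1 := by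
    rw [Int.toNat_natCast]
    apply loopB_eq_Den n _ [] 1 (by simp) (by simp) (by norm_num) (by norm_num)
    have hV : 0 < Vm n [] 1 := by
      simp only [Vm, Wf, List.length_nil, Nat.sub_zero, Int.toNat_one, one_mul, Nat.zero_add]
      exact Nat.pow_pos (show 0 < 5 by norm_num) (n := n)
    exact Nat.sub_lt (Nat.pow_pos (show 0 < 5 by norm_num) (n := n + 1)) hV
  rw [hA, hB, Den_nil]
  cases bt n [] <;> rfl
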